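-- pv_equiv track=rewrite | github.com/IGVF-DACC/catalog-join-tables | parsers/parse_uniprot_proteins_to_jsonl.py | get_dbxrefs
-- ===== SOURCE A (Python) =====
-- def get_dbxrefs(cross_references):
--     dbxrefs = []
--     for cross_reference in cross_references:
--         database_name = cross_reference[0]
--         if database_name == 'EMBL':
--             for id in cross_reference[1:3]:
--                 if id != '-':
--                     dbxrefs.append({
--                         'name': database_name,
--                         'id': id
--                     })
--         elif database_name in ['RefSeq', 'Ensembl', 'MANE-Select']:
--             for item in cross_reference[1:]:
--                 if item != '-':
--                     id = item.split('. ')[0]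
--                     dbxrefs.append({
--                         'name': database_name,
--                         'id': id
--                     })
--         else:
--             dbxrefs.append({
--                 'name': cross_reference[0],
--                 'id': cross_reference[1]
--             })
--     dbxrefs.sort(key=lambda x: x['name'])
--     return dbxrefs
-- ===== SOURCE B (Python) =====
-- def _ids(cross_reference):
--     name = cross_reference[0]
--     if name == 'EMBL':
--         return [i for i in cross_reference[1:3] if i != '-']
--     if name in ('RefSeq', 'Ensembl', 'MANE-Select'):
--         return [i.split('. ')[0] for i in cross_reference[1:] if i != '-']
--     return [cross_reference[1]]
--
--
-- def get_dbxrefs(cross_references):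
--     groups = {}
--     for cross_reference in cross_references:
--         name = cross_reference[0]
--         for id in _ids(cross_reference):
--             groups.setdefault(name, []).append({'name': name, 'id': id})
--     out = []
--     for name in sorted(groups):
--         out.extend(groups[name])
--     return out
-- ===== Notes on version B (the rewrite author's own statement) =====
-- stated objective: alternative
-- what changed: B replaces A's append-everything-then-stable-sort with a single-pass grouping dict keyed by database name (each group keeps first-seen insertion order) and emits the groups in sorted-key order, so the final sort runs over distinct names only.
import Mathlib
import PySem

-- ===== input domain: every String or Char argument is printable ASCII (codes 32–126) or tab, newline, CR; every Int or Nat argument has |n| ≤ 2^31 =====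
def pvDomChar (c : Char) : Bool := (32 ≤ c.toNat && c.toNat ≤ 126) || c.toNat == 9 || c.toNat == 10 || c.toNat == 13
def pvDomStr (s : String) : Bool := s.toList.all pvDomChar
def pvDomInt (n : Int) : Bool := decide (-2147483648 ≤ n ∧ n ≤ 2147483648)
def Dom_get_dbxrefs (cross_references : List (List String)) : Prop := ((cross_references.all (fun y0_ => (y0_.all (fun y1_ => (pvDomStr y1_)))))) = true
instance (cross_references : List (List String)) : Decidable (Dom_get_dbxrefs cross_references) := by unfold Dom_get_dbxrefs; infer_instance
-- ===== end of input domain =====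

-- B replaces A's append-everything-then-stable-sort with a single-pass grouping dict keyed by
-- database name, emitted in sorted-key order (alternative decomposition, same results).

-- ===== PORT A =====
-- A's sort key `x['name']`: first-match lookup in the entry dict; the entries A builds always
-- carry "name", so the `.getD ""` default is never reached on A's own data.
def pvNameKey (e : List (String × String)) : String :=
  ((PySem.Dict.mk e).get? "name").getD ""

def get_dbxrefs (cross_references : List (List String)) : List (List (String × String)) :=
  let dbxrefs := cross_references.foldl (fun dbxrefs cross_reference =>
    let database_name := PySem.List.pyGetD cross_reference 0 ""
    if database_name = "EMBL" then
      (PySem.List.slice cross_reference (some 1) (some 3)).foldl (fun dbxrefs id =>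
        if id ≠ "-" then dbxrefs ++ [[("name", database_name), ("id", id)]] else dbxrefs) dbxrefs
    else if ["RefSeq", "Ensembl", "MANE-Select"].contains database_name then
      (PySem.List.slice cross_reference (some 1) none).foldl (fun dbxrefs item =>
        if item ≠ "-" then
          dbxrefs ++ [[("name", database_name),
                       ("id", PySem.List.pyGetD ((PySem.Str.split? item ". ").getD []) 0 "")]]
        else dbxrefs) dbxrefs
    else
      dbxrefs ++ [[("name", PySem.List.pyGetD cross_reference 0 ""),
                   ("id", PySem.List.pyGetD cross_reference 1 "")]]) []
  PySem.List.sorted dbxrefs pvNameKey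

-- ===== PORT B =====
def ids_alt (cross_reference : List String) : List String :=
  let name := PySem.List.pyGetD cross_reference 0 ""
  if name = "EMBL" then
    (PySem.List.slice cross_reference (some 1) (some 3)).filter (fun i => i ≠ "-")
  else if ["RefSeq", "Ensembl", "MANE-Select"].contains name then
    ((PySem.List.slice cross_reference (some 1) none).filter (fun i => i ≠ "-")).map
      (fun i => PySem.List.pyGetD ((PySem.Str.split? i ". ").getD []) 0 "")
  else [PySem.List.pyGetD cross_reference 1 ""]

def get_dbxrefs_alt (cross_references : List (List String)) : List (List (String × String)) :=
  let groups : PySem.Dict String (List (List (String × String))) :=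
    cross_references.foldl (fun groups cross_reference =>
      let name := PySem.List.pyGetD cross_reference 0 ""
      (ids_alt cross_reference).foldl (fun groups id =>
        groups.modify name [] (fun l => l ++ [[("name", name), ("id", id)]])) groups)
      PySem.Dict.empty
  (PySem.List.sorted groups.keys (fun k => k)).foldl (fun out name => out ++ groups.getD name []) []

-- ===== PRECONDITION & SPEC =====
-- Pre_ excludes exactly the inputs where Python A raises IndexError: an empty cross_reference
-- (cross_reference[0]), or one of length 1 whose database name takes the default branch
-- (cross_reference[1]).
def Pre_get_dbxrefs (cross_references : List (List String)) : Prop :=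
  ∀ cr ∈ cross_references, 1 ≤ cr.length ∧
    (cr.headD "" ∉ (["EMBL", "RefSeq", "Ensembl", "MANE-Select"] : List String) → 2 ≤ cr.length)
instance (cross_references : List (List String)) : Decidable (Pre_get_dbxrefs cross_references) := by
  unfold Pre_get_dbxrefs; infer_instance

def pvWitness_get_dbxrefs : List (List String) :=
  [["PDB", "1ABC"], ["EMBL", "AY123", "-"], ["RefSeq", "NP_1. x", "-"], ["PDB", "2XYZ"]]

def Spec_get_dbxrefs (cross_references : List (List String)) (out : List (List (String × String))) : Prop := out = get_dbxrefs_alt cross_references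
instance (cross_references : List (List String)) (out : List (List (String × String))) : Decidable (Spec_get_dbxrefs cross_references out) := by unfold Spec_get_dbxrefs; infer_instance

-- ===== CLAIM (what is proved, stated in full; the proofs are below) =====
def Claim_equal_get_dbxrefs : Prop := ∀ (cross_references : List (List String)), Dom_get_dbxrefs cross_references → Pre_get_dbxrefs cross_references → Spec_get_dbxrefs cross_references (get_dbxrefs cross_references)

-- ===== LEMMAS AND PROOFS =====

-- the per-record entry list both programs produce (A appends it flat, B groups it)
def pvEnt (cr : List String) : List (List (String × String)) :=
  (ids_alt cr).map (fun id => [("name", PySem.List.pyGetD cr 0 ""), ("id", id)])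

theorem pvNameKey_ent (n i : String) : pvNameKey [("name", n), ("id", i)] = n := by
  simp [pvNameKey, PySem.Dict.get?_mk_cons]

-- the 'if x != c: out.append(f(x))' loop, with the branches in A's order
theorem foldl_skip_append {α β : Type} [DecidableEq α] (c : α) (f : α → β)
    (l : List α) (acc : List β) :
    l.foldl (fun acc x => if x = c then acc else acc ++ [f x]) acc
      = acc ++ (l.filter (fun x => !decide (x = c))).map f := by
  have := PySem.List.foldl_append_ite (fun x => x ≠ c) f l acc
  simpa [ite_not] using this

-- A's loop, flattened: append-with-branches over every record = flatMap of pvEnt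
theorem getA_eq_sorted_flat (crs : List (List String)) :
    get_dbxrefs crs = PySem.List.sorted (crs.flatMap pvEnt) pvNameKey := by
  unfold get_dbxrefs
  simp only []
  congr 1
  have hstep : ∀ (acc : List (List (String × String))) (cr : List String),
      (let database_name := PySem.List.pyGetD cr 0 ""
       if database_name = "EMBL" then
        (PySem.List.slice cr (some 1) (some 3)).foldl (fun dbxrefs id =>
          if id ≠ "-" then dbxrefs ++ [[("name", database_name), ("id", id)]] else dbxrefs) acc
       else if ["RefSeq", "Ensembl", "MANE-Select"].contains database_name then
        (PySem.List.slice cr (some 1) none).foldl (fun dbxrefs item =>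
          if item ≠ "-" then
            dbxrefs ++ [[("name", database_name),
                         ("id", PySem.List.pyGetD ((PySem.Str.split? item ". ").getD []) 0 "")]]
          else dbxrefs) acc
       else
        acc ++ [[("name", PySem.List.pyGetD cr 0 ""),
                 ("id", PySem.List.pyGetD cr 1 "")]])
      = acc ++ pvEnt cr := by
    intro acc cr
    simp only [pvEnt, ids_alt]
    split_ifs with h1 h2
    · simp [foldl_skip_append]
    · simp [foldl_skip_append, List.map_map, Function.comp]
    · simp
  rw [PySem.List.foldl_congr_mem crs _ (fun acc cr => acc ++ pvEnt cr) []
    (fun acc cr _ => hstep acc cr)]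
  simpa using PySem.List.foldl_append_eq_flatMap pvEnt crs []

-- folding over a flatMap = the nested loop
theorem foldl_flatMap_eq {α β γ : Type} (f : α → List β) (g : γ → β → γ) (l : List α) (init : γ) :
    (l.flatMap f).foldl g init = l.foldl (fun acc x => (f x).foldl g acc) init := by
  induction l generalizing init with
  | nil => rfl
  | cons x t ih => simp [List.flatMap_cons, List.foldl_append, ih]

-- B's grouping dict, characterised: contents and keys
theorem getB_eq_flat_groups (crs : List (List String)) :
    get_dbxrefs_alt crs =
      (PySem.List.sorted (PySem.Set.ofList ((crs.flatMap pvEnt).map pvNameKey)) (fun k => k)).flatMap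
        (fun k => (crs.flatMap pvEnt).filter (fun e => pvNameKey e == k)) := by
  unfold get_dbxrefs_alt
  simp only []
  have hgroups : crs.foldl (fun groups cross_reference =>
      let name := PySem.List.pyGetD cross_reference 0 ""
      (ids_alt cross_reference).foldl (fun groups id =>
        groups.modify name [] (fun l => l ++ [[("name", name), ("id", id)]])) groups)
      PySem.Dict.empty
      = (crs.flatMap pvEnt).foldl
          (fun g e => g.modify (pvNameKey e) [] (fun l => l ++ [e])) PySem.Dict.empty := by
    rw [foldl_flatMap_eq]
    refine PySem.List.foldl_congr_mem crs _ _ PySem.Dict.empty (fun g cr _ => ?_)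
    simp only [pvEnt, List.foldl_map, pvNameKey_ent]
  rw [hgroups]
  set es := crs.flatMap pvEnt with hes
  have hpairs : es.foldl (fun g e => g.modify (pvNameKey e) [] (fun l => l ++ [e]))
        (PySem.Dict.empty (κ := String) (ν := List (List (String × String))))
      = (es.map (fun e => (pvNameKey e, e))).foldl
          (fun d p => d.modify p.1 [] (fun l => l ++ [p.2])) PySem.Dict.empty := by
    rw [List.foldl_map]
  have hgetD : ∀ k, (es.foldl (fun g e => g.modify (pvNameKey e) [] (fun l => l ++ [e]))
        (PySem.Dict.empty (κ := String) (ν := List (List (String × String))))).getD k []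
      = es.filter (fun e => pvNameKey e == k) := by
    intro k
    rw [hpairs, PySem.Dict.getD_foldl_modify_append]
    simp [List.filter_map, List.map_map, Function.comp_def]
  have hkeys : (es.foldl (fun g e => g.modify (pvNameKey e) [] (fun l => l ++ [e]))
        (PySem.Dict.empty (κ := String) (ν := List (List (String × String))))).keys
      = PySem.Set.ofList (es.map pvNameKey) := by
    rw [PySem.Dict.keys_foldl_modify_key es pvNameKey [] (fun _ e => (fun l => l ++ [e]))]
    simp [PySem.Set.update_nil_left, PySem.Dict.keys_empty]
  rw [hkeys]
  have hfold : ∀ (ks : List String), ks.foldl (fun out name =>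
        out ++ (es.foldl (fun g e => g.modify (pvNameKey e) [] (fun l => l ++ [e]))
          (PySem.Dict.empty (κ := String) (ν := List (List (String × String))))).getD name []) []
      = ks.flatMap (fun k => es.filter (fun e => pvNameKey e == k)) := by
    intro ks
    have h1 : ks.foldl (fun out name =>
        out ++ (es.foldl (fun g e => g.modify (pvNameKey e) [] (fun l => l ++ [e]))
          (PySem.Dict.empty (κ := String) (ν := List (List (String × String))))).getD name []) []
      = ks.foldl (fun out k => out ++ es.filter (fun e => pvNameKey e == k)) [] := by
      refine PySem.List.foldl_congr_mem ks _ _ [] (fun out k _ => ?_)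
      rw [hgetD]
    rw [h1]
    simpa using PySem.List.foldl_append_eq_flatMap
      (fun k => es.filter (fun e => pvNameKey e == k)) ks []
  exact hfold _

-- insertBy lands exactly between the kept prefix and the pushed-back suffix
theorem insertBy_middle {α : Type} (before : α → α → Bool) (x : α) (l1 l2 : List α)
    (h1 : ∀ y ∈ l1, before x y = false) (h2 : ∀ z ∈ l2, before x z = true) :
    PySem.List.insertBy before x (l1 ++ l2) = l1 ++ x :: l2 := by
  induction l1 with
  | nil =>
    cases l2 with
    | nil => simp [PySem.List.insertBy]
    | cons z t => simp [PySem.List.insertBy, h2 z (by simp)]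
  | cons y t ih =>
    simp only [List.cons_append, PySem.List.insertBy, h1 y (by simp), Bool.false_eq_true,
      if_false]
    rw [ih (fun y hy => h1 y (by simp [hy]))]

-- a pairwise-< list splits at any pivot into its ≤-prefix and its >-suffix
theorem pairwise_split {α : Type} [LinearOrder α] (a : α) (l : List α)
    (h : l.Pairwise (· < ·)) :
    l = l.filter (fun k => k ≤ a) ++ l.filter (fun k => a < k) := by
  induction l with
  | cons k t ih =>
    obtain ⟨hk, ht'⟩ := List.pairwise_cons.mp h
    have ht := ih ht'
    by_cases hka : k ≤ a
    · simp only [List.filter_cons]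
      simp [hka, not_lt.mpr hka, ← ht]
    · rw [not_le] at hka
      have hall : ∀ y ∈ t, a < y := fun y hy => lt_trans hka (hk y hy)
      have hf1 : t.filter (fun k => decide (k ≤ a)) = [] := by
        refine List.filter_eq_nil_iff.mpr (fun y hy => ?_)
        simp [not_le.mpr (hall y hy)]
      have hf2 : t.filter (fun k => decide (a < k)) = t := by
        refine List.filter_eq_self.mpr (fun y hy => ?_)
        simp [hall y hy]
      simp [not_le.mpr hka, hka, hf1, hf2]
  | nil => rfl

-- flatMap respects pointwise-on-members equality
theorem flatMap_congr_mem {α β : Type} {f g : α → List β} (l : List α)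
    (h : ∀ x ∈ l, f x = g x) : l.flatMap f = l.flatMap g := by
  induction l with
  | nil => rfl
  | cons x t ih =>
    simp only [List.flatMap_cons, h x (by simp), ih (fun y hy => h y (by simp [hy]))]

-- appending the new element at the end of its own (last) group
theorem flatMap_last_group {α β : Type} [LinearOrder α] (F : α → List β) (x : β)
    (a : α) (l : List α) (hp : l.Pairwise (· < ·)) (hmem : a ∈ l) (hle : ∀ k ∈ l, k ≤ a) :
    l.flatMap (fun k => F k ++ if a == k then [x] else []) = l.flatMap F ++ [x] := by
  induction l with
  | nil => cases hmem
  | cons k t ih =>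
    obtain ⟨hk, ht'⟩ := List.pairwise_cons.mp hp
    rcases List.mem_cons.mp hmem with h | h
    · subst h
      have ht : t = [] := by
        cases t with
        | nil => rfl
        | cons y s => exact absurd (hle y (by simp)) (not_le.mpr (hk y (by simp)))
      simp [ht]
    · have hka : k < a := hk a h
      have hne : (a == k) = false := by simp [ne_of_gt hka]
      simp only [List.flatMap_cons, hne]
      rw [ih ht' h (fun y hy => hle y (by simp [hy]))]
      simp

-- key of a member of a filtered group
theorem key_of_mem_group {α β : Type} [BEq β] [LawfulBEq β] (key : α → β) (es : List α)
    (k : β) (y : α) (hy : y ∈ es.filter (fun e => key e == k)) : key y = k := by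
  have := List.of_mem_filter hy
  simpa using this

-- THE CORE: a stable sort by key = the groups (first-seen order inside each) emitted in
-- sorted key order
theorem sorted_eq_flat_groups {α : Type} (key : α → String) (es : List α) :
    PySem.List.sorted es key =
      (PySem.List.sorted (PySem.Set.ofList (es.map key)) (fun k => k)).flatMap
        (fun k => es.filter (fun e => key e == k)) := by
  induction es using List.reverseRecOn with
  | nil => simp [PySem.List.sorted_eq_foldl_insertBy, PySem.Set.ofList]
  | append_singleton es x ih =>
    have hsnoc : PySem.List.sorted (es ++ [x]) key
        = PySem.List.insertBy (fun a b => decide (key a < key b)) x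
            (PySem.List.sorted es key) := by
      rw [PySem.List.sorted_eq_foldl_insertBy, PySem.List.sorted_eq_foldl_insertBy,
        List.foldl_append]
      rfl
    set S := PySem.Set.ofList (es.map key) with hS
    set ks := PySem.List.sorted S (fun k => k) with hks
    have hkp : ks.Pairwise (· < ·) := PySem.List.sorted_ofList_pairwise_lt _
    set l1 := ks.filter (fun k => decide (k ≤ key x)) with hl1
    set l2 := ks.filter (fun k => decide (key x < k)) with hl2
    have hsplit : ks = l1 ++ l2 := pairwise_split (key x) ks hkp
    have hmem_ks : ∀ k, k ∈ ks ↔ k ∈ es.map key := by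
      intro k
      rw [hks, PySem.List.mem_sorted, hS, PySem.Set.mem_ofList]
    have hl1le : ∀ k ∈ l1, k ≤ key x := by
      intro k hk; simpa using List.of_mem_filter hk
    have hl2gt : ∀ k ∈ l2, key x < k := by
      intro k hk; simpa using List.of_mem_filter hk
    have hb1 : ∀ y ∈ l1.flatMap (fun k => es.filter (fun e => key e == k)),
        (fun a b => decide (key a < key b)) x y = false := by
      intro y hy
      obtain ⟨k, hk, hy'⟩ := List.mem_flatMap.mp hy
      have hkey := key_of_mem_group key es k y hy'
      simp [not_lt.mpr (hkey ▸ hl1le k hk)]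
    have hb2 : ∀ z ∈ l2.flatMap (fun k => es.filter (fun e => key e == k)),
        (fun a b => decide (key a < key b)) x z = true := by
      intro z hz
      obtain ⟨k, hk, hz'⟩ := List.mem_flatMap.mp hz
      have hkey := key_of_mem_group key es k z hz'
      simp [hkey ▸ hl2gt k hk]
    have hF' : ∀ k, (es ++ [x]).filter (fun e => key e == k)
        = es.filter (fun e => key e == k) ++ (if key x == k then [x] else []) := by
      intro k
      rw [List.filter_append]
      congr 1
      simp [List.filter_cons]
    have hmap : (es ++ [x]).map key = es.map key ++ [key x] := by simp
    rw [hsnoc, ih, hsplit, List.flatMap_append,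
      insertBy_middle _ x _ _ hb1 hb2, hmap, PySem.Set.ofList_append_singleton, ← hS]
    by_cases hmem : key x ∈ es.map key
    · have hcont : S.contains (key x) = true := by
        rw [PySem.Set.contains_iff, hS]
        exact (PySem.Set.mem_ofList _ _).mpr hmem
      have hadd : S.add (key x) = S := by
        simp only [PySem.Set.add, hcont]
        simp
      rw [hadd, ← hks]
      have hrw : ks.flatMap (fun k => (es ++ [x]).filter (fun e => key e == k))
          = ks.flatMap (fun k => es.filter (fun e => key e == k)
              ++ (if key x == k then [x] else [])) :=
        flatMap_congr_mem ks (fun k _ => hF' k)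
      rw [hrw, hsplit, List.flatMap_append]
      have hxl1 : key x ∈ l1 := by
        rw [hl1]
        refine List.mem_filter.mpr ⟨(hmem_ks (key x)).mpr hmem, by simp⟩
      have hg1 : l1.flatMap (fun k => es.filter (fun e => key e == k)
            ++ (if key x == k then [x] else []))
          = l1.flatMap (fun k => es.filter (fun e => key e == k)) ++ [x] :=
        flatMap_last_group _ x (key x) l1
          (List.Pairwise.sublist List.filter_sublist hkp) hxl1 hl1le
      have hg2 : l2.flatMap (fun k => es.filter (fun e => key e == k)
            ++ (if key x == k then [x] else []))
          = l2.flatMap (fun k => es.filter (fun e => key e == k)) := by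
        refine flatMap_congr_mem l2 (fun k hk => ?_)
        have : (key x == k) = false := by simp [ne_of_lt (hl2gt k hk)]
        simp [this]
      rw [hg1, hg2]
      simp
    · have hcont : S.contains (key x) = false := by
        rw [Bool.eq_false_iff, Ne, PySem.Set.contains_iff, hS]
        exact fun h => hmem ((PySem.Set.mem_ofList _ _).mp h)
      have hadd : S.add (key x) = S ++ [key x] := by
        simp only [PySem.Set.add, hcont]
        simp
      rw [hadd]
      have hsnock : PySem.List.sorted (S ++ [key x]) (fun k => k)
          = PySem.List.insertBy (fun a b => decide (a < b)) (key x) ks := by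
        rw [hks, PySem.List.sorted_eq_foldl_insertBy, PySem.List.sorted_eq_foldl_insertBy,
          List.foldl_append]
        rfl
      have hkb1 : ∀ k ∈ l1, (fun a b => decide (a < b)) (key x) k = false := by
        intro k hk; simp [not_lt.mpr (hl1le k hk)]
      have hkb2 : ∀ k ∈ l2, (fun a b => decide (a < b)) (key x) k = true := by
        intro k hk; simp [hl2gt k hk]
      rw [hsnock, hsplit, insertBy_middle _ _ _ _ hkb1 hkb2]
      have hne : ∀ k ∈ ks, (key x == k) = false := by
        intro k hk
        have : k ∈ es.map key := (hmem_ks k).mp hk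
        have : key x ≠ k := fun h => hmem (h ▸ this)
        simp [this]
      have hfx : (es ++ [x]).filter (fun e => key e == key x) = [x] := by
        rw [hF' (key x)]
        have : es.filter (fun e => key e == key x) = [] := by
          refine List.filter_eq_nil_iff.mpr (fun e he => ?_)
          have hmeme : key e ∈ es.map key := List.mem_map_of_mem he
          simp only [beq_iff_eq]
          exact fun h => hmem (h ▸ hmeme)
        simp [this]
      rw [List.flatMap_append, List.flatMap_cons, hfx]
      have hg1 : l1.flatMap (fun k => (es ++ [x]).filter (fun e => key e == k))
          = l1.flatMap (fun k => es.filter (fun e => key e == k)) := by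
        refine flatMap_congr_mem l1 (fun k hk => ?_)
        rw [hF' k]
        have := hne k (by rw [hsplit]; exact List.mem_append_left _ hk)
        simp [this]
      have hg2 : l2.flatMap (fun k => (es ++ [x]).filter (fun e => key e == k))
          = l2.flatMap (fun k => es.filter (fun e => key e == k)) := by
        refine flatMap_congr_mem l2 (fun k hk => ?_)
        rw [hF' k]
        have := hne k (by rw [hsplit]; exact List.mem_append_right _ hk)
        simp [this]
      rw [hg1, hg2]
      simp

-- ===== VERDICT (by name: the statement is the Claim_ definition above) =====
theorem get_dbxrefs_spec : Claim_equal_get_dbxrefs := by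
  intro crs _ _
  unfold Spec_get_dbxrefs
  rw [getA_eq_sorted_flat, getB_eq_flat_groups, sorted_eq_flat_groups]
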